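-- pv_equiv track=rewrite | github.com/flaviarubira/Tarifas-Catarina | app.py | definir_categoria
-- ===== SOURCE A (Python) =====
-- def definir_categoria(peso):
--     categorias = [
--         (0, 1000, "I"),
--         (1000, 2000, "II"),
--         (2000, 4000, "III"),
--         (4000, 6000, "IV"),
--         (6000, 12000, "V"),
--         (12000, 24500, "VI"),
--         (24500, 48000, "VII"),
--         (48000, 100000, "VIII"),
--     ]
--     for min_peso, max_peso, categoria in categorias:
--         if min_peso <= peso < max_peso:
--             return categoria
--     return "Desconhecida"
-- ===== SOURCE B (Python) =====
-- def definir_categoria(peso):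
--     # Binary search over the lower bounds of the bands, after out-of-range guards.
--     boundaries = [0, 1000, 2000, 4000, 6000, 12000, 24500, 48000]
--     labels = ["I", "II", "III", "IV", "V", "VI", "VII", "VIII"]
--     if peso < 0 or peso >= 100000:
--         return "Desconhecida"
--     lo, hi = 0, len(boundaries)
--     while lo < hi:
--         mid = (lo + hi) // 2
--         if boundaries[mid] <= peso:
--             lo = mid + 1
--         else:
--             hi = mid
--     return labels[lo - 1]
-- ===== Notes on version B (the rewrite author's own statement) =====
-- stated objective: alternative
-- what changed: Replaces the linear scan over (min,max,label) band triples with out-of-range guards followed by a hand-written binary search (bisect_right) over a sorted list of lower bounds, indexing a parallel label list.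
import Mathlib
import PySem

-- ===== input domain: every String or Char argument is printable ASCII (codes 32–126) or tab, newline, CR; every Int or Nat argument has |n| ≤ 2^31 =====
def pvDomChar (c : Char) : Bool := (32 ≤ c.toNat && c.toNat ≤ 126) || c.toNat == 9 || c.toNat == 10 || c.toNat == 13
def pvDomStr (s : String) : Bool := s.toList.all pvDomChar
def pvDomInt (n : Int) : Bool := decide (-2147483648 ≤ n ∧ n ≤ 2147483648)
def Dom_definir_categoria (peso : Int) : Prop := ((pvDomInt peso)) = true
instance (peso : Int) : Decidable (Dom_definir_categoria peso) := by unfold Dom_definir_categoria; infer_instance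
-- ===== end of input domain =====

-- Both programs are total pure functions of one int; B replaces the linear band scan
-- with guards plus a binary search over sorted lower bounds (alternative structure).


-- ===== PORT A =====
-- literal port of A: scan the (min, max, label) triples, first band with min ≤ peso < max wins
def definir_categoria_scan (peso : Int) : List (Int × Int × String) → String
  | [] => "Desconhecida"
  | (mn, mx, cat) :: rest =>
      if mn ≤ peso ∧ peso < mx then cat else definir_categoria_scan peso rest

def definir_categoria (peso : Int) : String :=
  definir_categoria_scan peso
    [(0, 1000, "I"), (1000, 2000, "II"), (2000, 4000, "III"), (4000, 6000, "IV"),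
     (6000, 12000, "V"), (12000, 24500, "VI"), (24500, 48000, "VII"), (48000, 100000, "VIII")]

-- ===== PORT B =====
-- the while-loop of Source B: bisect_right on `boundaries`, fuel = hi - lo bound
def definir_categoria_bs (boundaries : List Int) (peso : Int) : Nat → Nat → Nat → Nat
  | 0, lo, _ => lo
  | fuel + 1, lo, hi =>
      if lo < hi then
        let mid := (lo + hi) / 2
        if boundaries.getD mid 0 ≤ peso then definir_categoria_bs boundaries peso fuel (mid + 1) hi
        else definir_categoria_bs boundaries peso fuel lo mid
      else lo

def definir_categoria_alt (peso : Int) : String :=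
  let boundaries : List Int := [0, 1000, 2000, 4000, 6000, 12000, 24500, 48000]
  let labels : List String := ["I", "II", "III", "IV", "V", "VI", "VII", "VIII"]
  if peso < 0 ∨ 100000 ≤ peso then "Desconhecida"
  else labels.getD (definir_categoria_bs boundaries peso boundaries.length 0 boundaries.length - 1) "Desconhecida"

-- ===== PRECONDITION & SPEC =====
def Spec_definir_categoria (peso : Int) (out : String) : Prop := out = definir_categoria_alt peso
instance (peso : Int) (out : String) : Decidable (Spec_definir_categoria peso out) := by unfold Spec_definir_categoria; infer_instance

-- ===== CLAIM (what is proved, stated in full; the proofs are below) =====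
def Claim_equal_definir_categoria : Prop := ∀ (peso : Int), Dom_definir_categoria peso → Spec_definir_categoria peso (definir_categoria peso)

-- ===== LEMMAS AND PROOFS =====

-- ===== VERDICT (by name: the statement is the Claim_ definition above) =====
theorem definir_categoria_spec : Claim_equal_definir_categoria := by
  intro peso _
  unfold Spec_definir_categoria definir_categoria definir_categoria_alt
  rcases lt_or_ge peso 0 with h | h0
  · simp [definir_categoria_scan, definir_categoria_bs,
      show ¬(0:Int) ≤ peso from by omega,
      show ¬(1000:Int) ≤ peso from by omega,
      show ¬(2000:Int) ≤ peso from by omega,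
      show ¬(4000:Int) ≤ peso from by omega,
      show ¬(6000:Int) ≤ peso from by omega,
      show ¬(12000:Int) ≤ peso from by omega,
      show ¬(24500:Int) ≤ peso from by omega,
      show ¬(48000:Int) ≤ peso from by omega,
      show peso < 0 from by omega,
      show ¬((100000:Int) ≤ peso) from by omega,
      show ¬((0:Int) ≤ peso ∧ peso < 1000) from by omega,
      show ¬((1000:Int) ≤ peso ∧ peso < 2000) from by omega,
      show ¬((2000:Int) ≤ peso ∧ peso < 4000) from by omega,
      show ¬((4000:Int) ≤ peso ∧ peso < 6000) from by omega,
      show ¬((6000:Int) ≤ peso ∧ peso < 12000) from by omega,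
      show ¬((12000:Int) ≤ peso ∧ peso < 24500) from by omega,
      show ¬((24500:Int) ≤ peso ∧ peso < 48000) from by omega,
      show ¬((48000:Int) ≤ peso ∧ peso < 100000) from by omega] <;> (try split_ifs <;> first | rfl | omega)
  rcases lt_or_ge peso 1000 with h | h1000
  · simp [definir_categoria_scan, definir_categoria_bs,
      show (0:Int) ≤ peso from by omega,
      show ¬(1000:Int) ≤ peso from by omega,
      show ¬(2000:Int) ≤ peso from by omega,
      show ¬(4000:Int) ≤ peso from by omega,
      show ¬(6000:Int) ≤ peso from by omega,
      show ¬(12000:Int) ≤ peso from by omega,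
      show ¬(24500:Int) ≤ peso from by omega,
      show ¬(48000:Int) ≤ peso from by omega,
      show ¬ peso < 0 from by omega,
      show ¬((100000:Int) ≤ peso) from by omega,
      show ¬((1000:Int) ≤ peso ∧ peso < 2000) from by omega,
      show ¬((2000:Int) ≤ peso ∧ peso < 4000) from by omega,
      show ¬((4000:Int) ≤ peso ∧ peso < 6000) from by omega,
      show ¬((6000:Int) ≤ peso ∧ peso < 12000) from by omega,
      show ¬((12000:Int) ≤ peso ∧ peso < 24500) from by omega,
      show ¬((24500:Int) ≤ peso ∧ peso < 48000) from by omega,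
      show ¬((48000:Int) ≤ peso ∧ peso < 100000) from by omega] <;> (try split_ifs <;> first | rfl | omega)
  rcases lt_or_ge peso 2000 with h | h2000
  · simp [definir_categoria_scan, definir_categoria_bs,
      show (0:Int) ≤ peso from by omega,
      show (1000:Int) ≤ peso from by omega,
      show ¬(2000:Int) ≤ peso from by omega,
      show ¬(4000:Int) ≤ peso from by omega,
      show ¬(6000:Int) ≤ peso from by omega,
      show ¬(12000:Int) ≤ peso from by omega,
      show ¬(24500:Int) ≤ peso from by omega,
      show ¬(48000:Int) ≤ peso from by omega,
      show ¬ peso < 0 from by omega,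
      show ¬((100000:Int) ≤ peso) from by omega,
      show ¬((0:Int) ≤ peso ∧ peso < 1000) from by omega,
      show ¬((2000:Int) ≤ peso ∧ peso < 4000) from by omega,
      show ¬((4000:Int) ≤ peso ∧ peso < 6000) from by omega,
      show ¬((6000:Int) ≤ peso ∧ peso < 12000) from by omega,
      show ¬((12000:Int) ≤ peso ∧ peso < 24500) from by omega,
      show ¬((24500:Int) ≤ peso ∧ peso < 48000) from by omega,
      show ¬((48000:Int) ≤ peso ∧ peso < 100000) from by omega] <;> (try split_ifs <;> first | rfl | omega)
  rcases lt_or_ge peso 4000 with h | h4000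
  · simp [definir_categoria_scan, definir_categoria_bs,
      show (0:Int) ≤ peso from by omega,
      show (1000:Int) ≤ peso from by omega,
      show (2000:Int) ≤ peso from by omega,
      show ¬(4000:Int) ≤ peso from by omega,
      show ¬(6000:Int) ≤ peso from by omega,
      show ¬(12000:Int) ≤ peso from by omega,
      show ¬(24500:Int) ≤ peso from by omega,
      show ¬(48000:Int) ≤ peso from by omega,
      show ¬ peso < 0 from by omega,
      show ¬((100000:Int) ≤ peso) from by omega,
      show ¬((0:Int) ≤ peso ∧ peso < 1000) from by omega,
      show ¬((1000:Int) ≤ peso ∧ peso < 2000) from by omega,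
      show ¬((4000:Int) ≤ peso ∧ peso < 6000) from by omega,
      show ¬((6000:Int) ≤ peso ∧ peso < 12000) from by omega,
      show ¬((12000:Int) ≤ peso ∧ peso < 24500) from by omega,
      show ¬((24500:Int) ≤ peso ∧ peso < 48000) from by omega,
      show ¬((48000:Int) ≤ peso ∧ peso < 100000) from by omega] <;> (try split_ifs <;> first | rfl | omega)
  rcases lt_or_ge peso 6000 with h | h6000
  · simp [definir_categoria_scan, definir_categoria_bs,
      show (0:Int) ≤ peso from by omega,
      show (1000:Int) ≤ peso from by omega,
      show (2000:Int) ≤ peso from by omega,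
      show (4000:Int) ≤ peso from by omega,
      show ¬(6000:Int) ≤ peso from by omega,
      show ¬(12000:Int) ≤ peso from by omega,
      show ¬(24500:Int) ≤ peso from by omega,
      show ¬(48000:Int) ≤ peso from by omega,
      show ¬ peso < 0 from by omega,
      show ¬((100000:Int) ≤ peso) from by omega,
      show ¬((0:Int) ≤ peso ∧ peso < 1000) from by omega,
      show ¬((1000:Int) ≤ peso ∧ peso < 2000) from by omega,
      show ¬((2000:Int) ≤ peso ∧ peso < 4000) from by omega,
      show ¬((6000:Int) ≤ peso ∧ peso < 12000) from by omega,
      show ¬((12000:Int) ≤ peso ∧ peso < 24500) from by omega,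
      show ¬((24500:Int) ≤ peso ∧ peso < 48000) from by omega,
      show ¬((48000:Int) ≤ peso ∧ peso < 100000) from by omega] <;> (try split_ifs <;> first | rfl | omega)
  rcases lt_or_ge peso 12000 with h | h12000
  · simp [definir_categoria_scan, definir_categoria_bs,
      show (0:Int) ≤ peso from by omega,
      show (1000:Int) ≤ peso from by omega,
      show (2000:Int) ≤ peso from by omega,
      show (4000:Int) ≤ peso from by omega,
      show (6000:Int) ≤ peso from by omega,
      show ¬(12000:Int) ≤ peso from by omega,
      show ¬(24500:Int) ≤ peso from by omega,
      show ¬(48000:Int) ≤ peso from by omega,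
      show ¬ peso < 0 from by omega,
      show ¬((100000:Int) ≤ peso) from by omega,
      show ¬((0:Int) ≤ peso ∧ peso < 1000) from by omega,
      show ¬((1000:Int) ≤ peso ∧ peso < 2000) from by omega,
      show ¬((2000:Int) ≤ peso ∧ peso < 4000) from by omega,
      show ¬((4000:Int) ≤ peso ∧ peso < 6000) from by omega,
      show ¬((12000:Int) ≤ peso ∧ peso < 24500) from by omega,
      show ¬((24500:Int) ≤ peso ∧ peso < 48000) from by omega,
      show ¬((48000:Int) ≤ peso ∧ peso < 100000) from by omega] <;> (try split_ifs <;> first | rfl | omega)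
  rcases lt_or_ge peso 24500 with h | h24500
  · simp [definir_categoria_scan, definir_categoria_bs,
      show (0:Int) ≤ peso from by omega,
      show (1000:Int) ≤ peso from by omega,
      show (2000:Int) ≤ peso from by omega,
      show (4000:Int) ≤ peso from by omega,
      show (6000:Int) ≤ peso from by omega,
      show (12000:Int) ≤ peso from by omega,
      show ¬(24500:Int) ≤ peso from by omega,
      show ¬(48000:Int) ≤ peso from by omega,
      show ¬ peso < 0 from by omega,
      show ¬((100000:Int) ≤ peso) from by omega,
      show ¬((0:Int) ≤ peso ∧ peso < 1000) from by omega,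
      show ¬((1000:Int) ≤ peso ∧ peso < 2000) from by omega,
      show ¬((2000:Int) ≤ peso ∧ peso < 4000) from by omega,
      show ¬((4000:Int) ≤ peso ∧ peso < 6000) from by omega,
      show ¬((6000:Int) ≤ peso ∧ peso < 12000) from by omega,
      show ¬((24500:Int) ≤ peso ∧ peso < 48000) from by omega,
      show ¬((48000:Int) ≤ peso ∧ peso < 100000) from by omega] <;> (try split_ifs <;> first | rfl | omega)
  rcases lt_or_ge peso 48000 with h | h48000
  · simp [definir_categoria_scan, definir_categoria_bs,
      show (0:Int) ≤ peso from by omega,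
      show (1000:Int) ≤ peso from by omega,
      show (2000:Int) ≤ peso from by omega,
      show (4000:Int) ≤ peso from by omega,
      show (6000:Int) ≤ peso from by omega,
      show (12000:Int) ≤ peso from by omega,
      show (24500:Int) ≤ peso from by omega,
      show ¬(48000:Int) ≤ peso from by omega,
      show ¬ peso < 0 from by omega,
      show ¬((100000:Int) ≤ peso) from by omega,
      show ¬((0:Int) ≤ peso ∧ peso < 1000) from by omega,
      show ¬((1000:Int) ≤ peso ∧ peso < 2000) from by omega,
      show ¬((2000:Int) ≤ peso ∧ peso < 4000) from by omega,
      show ¬((4000:Int) ≤ peso ∧ peso < 6000) from by omega,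
      show ¬((6000:Int) ≤ peso ∧ peso < 12000) from by omega,
      show ¬((12000:Int) ≤ peso ∧ peso < 24500) from by omega,
      show ¬((48000:Int) ≤ peso ∧ peso < 100000) from by omega] <;> (try split_ifs <;> first | rfl | omega)
  rcases lt_or_ge peso 100000 with h | h100000
  · simp [definir_categoria_scan, definir_categoria_bs,
      show (0:Int) ≤ peso from by omega,
      show (1000:Int) ≤ peso from by omega,
      show (2000:Int) ≤ peso from by omega,
      show (4000:Int) ≤ peso from by omega,
      show (6000:Int) ≤ peso from by omega,
      show (12000:Int) ≤ peso from by omega,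
      show (24500:Int) ≤ peso from by omega,
      show (48000:Int) ≤ peso from by omega,
      show ¬ peso < 0 from by omega,
      show ¬((100000:Int) ≤ peso) from by omega,
      show ¬((0:Int) ≤ peso ∧ peso < 1000) from by omega,
      show ¬((1000:Int) ≤ peso ∧ peso < 2000) from by omega,
      show ¬((2000:Int) ≤ peso ∧ peso < 4000) from by omega,
      show ¬((4000:Int) ≤ peso ∧ peso < 6000) from by omega,
      show ¬((6000:Int) ≤ peso ∧ peso < 12000) from by omega,
      show ¬((12000:Int) ≤ peso ∧ peso < 24500) from by omega,
      show ¬((24500:Int) ≤ peso ∧ peso < 48000) from by omega] <;> (try split_ifs <;> first | rfl | omega)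
  · simp [definir_categoria_scan, definir_categoria_bs,
      show (0:Int) ≤ peso from by omega,
      show (1000:Int) ≤ peso from by omega,
      show (2000:Int) ≤ peso from by omega,
      show (4000:Int) ≤ peso from by omega,
      show (6000:Int) ≤ peso from by omega,
      show (12000:Int) ≤ peso from by omega,
      show (24500:Int) ≤ peso from by omega,
      show (48000:Int) ≤ peso from by omega,
      show ¬ peso < 0 from by omega,
      show (100000:Int) ≤ peso from by omega,
      show ¬((0:Int) ≤ peso ∧ peso < 1000) from by omega,
      show ¬((1000:Int) ≤ peso ∧ peso < 2000) from by omega,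
      show ¬((2000:Int) ≤ peso ∧ peso < 4000) from by omega,
      show ¬((4000:Int) ≤ peso ∧ peso < 6000) from by omega,
      show ¬((6000:Int) ≤ peso ∧ peso < 12000) from by omega,
      show ¬((12000:Int) ≤ peso ∧ peso < 24500) from by omega,
      show ¬((24500:Int) ≤ peso ∧ peso < 48000) from by omega,
      show ¬((48000:Int) ≤ peso ∧ peso < 100000) from by omega] <;> (try split_ifs <;> first | rfl | omega)
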